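-- pv_equiv track=rewrite | github.com/babar-raza/content-generator | src/orchestration/parallel_executor.py | identify_parallel_groups
-- ===== SOURCE A (Python) =====
-- from typing import Dict, List, Any, Optional, Callable, Tuple
--
-- def identify_parallel_groups(
--
--     steps: List[Dict[str, Any]],
--     dependencies: Dict[str, Dict[str, List[str]]]
-- ) -> List[Tuple[List[Dict[str, Any]], bool]]:
--     """Identify which steps can run in parallel.
--
--     Args:
--         steps: List of workflow steps
--         dependencies: Dependency map from config
--
--     Returns:
--         List of tuples (step_configs, is_parallel)
--     """
--     groups = []
--
--     # Known parallel patterns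
--     parallel_patterns = {
--         'ingestion': ['kb_ingestion', 'api_ingestion', 'blog_ingestion'],
--         'content_writers': ['introduction_writer', 'section_writer', 'conclusion_writer'],
--     }
--
--     i = 0
--     while i < len(steps):
--         step = steps[i]
--         agent_type = step.get('agent', step.get('id'))
--
--         # Check if this agent starts a parallel group
--         group_found = False
--         for pattern_name, pattern_agents in parallel_patterns.items():
--             if agent_type in pattern_agents:
--                 # Collect all consecutive agents in this pattern
--                 group_steps = []
--                 j = i
--                 while j < len(steps):
--                     next_agent = steps[j].get('agent', steps[j].get('id'))
--                     if next_agent in pattern_agents: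
--                         group_steps.append(steps[j])
--                         j += 1
--                     else:
--                         break
--
--                 if len(group_steps) > 1:
--                     # Found a parallel group
--                     groups.append((group_steps, True))
--                     i = j
--                     group_found = True
--                     break
--
--         if not group_found:
--             # Single agent, not parallel
--             groups.append(([step], False))
--             i += 1
--
--     return groups
-- ===== SOURCE B (Python) =====
-- def _flush(run, run_key):
--     """Emit a finished run: a parallel block if it matched a pattern and has >1 step, else singles."""
--     if run_key is not None and len(run) > 1:
--         return [(run, True)]
--     return [([step], False) for step in run]
--
--
-- def identify_parallel_groups(steps, dependencies):
--     parallel_patterns = {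
--         'ingestion': ['kb_ingestion', 'api_ingestion', 'blog_ingestion'],
--         'content_writers': ['introduction_writer', 'section_writer', 'conclusion_writer'],
--     }
--     owner = {agent: name for name, agents in parallel_patterns.items() for agent in agents}
--
--     groups = []
--     run = []
--     run_key = None
--     for step in steps:
--         key = owner.get(step.get('agent', step.get('id')))
--         if run and key == run_key:
--             run.append(step)
--         else:
--             groups.extend(_flush(run, run_key))
--             run = [step]
--             run_key = key
--     groups.extend(_flush(run, run_key))
--     return groups
-- ===== Notes on version B (the rewrite author's own statement) =====
-- stated objective: simpler
-- what changed: Replaced the index-driven while-loop with nested per-pattern rescans by a reverse agent->pattern lookup dict plus a single pass that accumulates consecutive same-key runs and flushes each run as a parallel block or singles.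
import Mathlib
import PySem

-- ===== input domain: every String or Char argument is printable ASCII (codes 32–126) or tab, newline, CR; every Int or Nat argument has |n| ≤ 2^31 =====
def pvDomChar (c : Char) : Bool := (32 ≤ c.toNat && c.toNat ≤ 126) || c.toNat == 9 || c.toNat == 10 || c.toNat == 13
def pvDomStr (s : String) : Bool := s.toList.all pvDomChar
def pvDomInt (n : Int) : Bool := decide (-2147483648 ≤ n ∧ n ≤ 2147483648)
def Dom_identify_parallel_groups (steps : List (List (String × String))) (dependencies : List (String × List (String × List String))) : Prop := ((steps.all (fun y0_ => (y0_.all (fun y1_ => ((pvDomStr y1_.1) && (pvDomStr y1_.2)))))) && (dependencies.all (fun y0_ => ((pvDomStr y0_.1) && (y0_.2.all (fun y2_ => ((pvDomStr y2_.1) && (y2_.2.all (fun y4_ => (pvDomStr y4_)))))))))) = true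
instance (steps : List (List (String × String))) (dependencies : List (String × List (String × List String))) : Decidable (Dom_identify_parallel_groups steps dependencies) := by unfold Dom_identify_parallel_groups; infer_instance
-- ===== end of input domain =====

-- B replaces A's index-driven while-loop with nested per-pattern rescans by a reverse
-- agent->pattern dict and one pass grouping consecutive same-key steps (objective: simpler).

-- ===== PORT A =====
-- step.get(k) : first match in the assoc list (dict in insertion order)
def pvStepGet (d : List (String × String)) (k : String) : Option String :=
  (d.find? (fun p => p.1 == k)).map (fun p => p.2)

-- agent_type = step.get('agent', step.get('id'))
def pvAgentType (s : List (String × String)) : Option String :=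
  match pvStepGet s "agent" with
  | some a => some a
  | none => pvStepGet s "id"

-- 'agent_type in pattern_agents' (agent_type may be None, which is in no list)
def pvMemOpt (o : Option String) (pa : List String) : Bool :=
  match o with
  | some a => pa.contains a
  | none => false

def pvPatterns : List (String × List String) :=
  [("ingestion", ["kb_ingestion", "api_ingestion", "blog_ingestion"]),
   ("content_writers", ["introduction_writer", "section_writer", "conclusion_writer"])]

-- inner 'while j < len(steps)' collector: consecutive steps (from position i) in the pattern,
-- plus the remaining suffix (the loop only advances its index, so it is recursion on the suffix)
def pvCollect (pa : List String) : List (List (String × String)) → (List (List (String × String)) × List (List (String × String)))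
  | [] => ([], [])
  | s :: rest =>
    if pvMemOpt (pvAgentType s) pa then
      let gr := pvCollect pa rest
      (s :: gr.1, gr.2)
    else ([], s :: rest)

-- 'for pattern_name, pattern_agents in parallel_patterns.items(): … break'
def pvTryPatterns (pats : List (String × List String)) (l : List (List (String × String))) (at_ : Option String) : Option (List (List (String × String)) × List (List (String × String))) :=
  match pats with
  | [] => none
  | (_, pa) :: ps =>
    if pvMemOpt at_ pa then
      let gr := pvCollect pa l
      if gr.1.length > 1 then some gr else pvTryPatterns ps l at_
    else pvTryPatterns ps l at_

theorem pvCollect_len (pa : List String) (l : List (List (String × String))) :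
    (pvCollect pa l).1.length + (pvCollect pa l).2.length = l.length := by
  induction l with
  | nil => simp [pvCollect]
  | cons s rest ih =>
    simp only [pvCollect]
    split <;> simp
    omega

theorem pvTryPatterns_len (pats : List (String × List String)) (l : List (List (String × String))) (at_ : Option String)
    (gr : List (List (String × String)) × List (List (String × String))) (h : pvTryPatterns pats l at_ = some gr) :
    gr.1.length + gr.2.length = l.length ∧ 1 < gr.1.length := by
  induction pats with
  | nil => simp [pvTryPatterns] at h
  | cons p ps ih =>
    simp only [pvTryPatterns] at h
    split at h
    · split at h
      · rename_i hlen
        injection h with h'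
        subst h'
        exact ⟨pvCollect_len p.2 l, hlen⟩
      · exact ih h
    · exact ih h

-- outer 'while i < len(steps)' of A
def pvLoopA : List (List (String × String)) → List ((List (List (String × String))) × Bool)
  | [] => []
  | s :: rest =>
    match h : pvTryPatterns pvPatterns (s :: rest) (pvAgentType s) with
    | some gr => (gr.1, true) :: pvLoopA gr.2
    | none => ([s], false) :: pvLoopA rest
termination_by l => l.length
decreasing_by
  · have := pvTryPatterns_len pvPatterns (s :: rest) (pvAgentType s) gr h
    simp only [List.length_cons] at this ⊢
    omega
  · simp

def identify_parallel_groups (steps : List (List (String × String))) (dependencies : List (String × List (String × List String))) : List ((List (List (String × String))) × Bool) :=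
  pvLoopA steps

-- ===== PORT B =====
def pvPatternsB : List (String × List String) :=
  [("ingestion", ["kb_ingestion", "api_ingestion", "blog_ingestion"]),
   ("content_writers", ["introduction_writer", "section_writer", "conclusion_writer"])]

-- owner = {agent: name for name, agents in parallel_patterns.items() for agent in agents}
def pvOwner : PySem.Dict String String :=
  List.foldl (fun d p => d.insert p.1 p.2) PySem.Dict.empty
    (pvPatternsB.flatMap (fun nm => nm.2.map (fun a => (a, nm.1))))

-- key = owner.get(step.get('agent', step.get('id')))  (a missing agent/id gives no key)
def pvKeyB (s : List (String × String)) : Option String :=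
  (((s.find? (fun p => p.1 == "agent")).map (fun p => p.2)).orElse
    (fun _ => (s.find? (fun p => p.1 == "id")).map (fun p => p.2))).bind
    (fun a => pvOwner.get? a)

-- _flush(run, run_key)
def pvFlush (run : List (List (String × String))) (k : Option String) : List ((List (List (String × String))) × Bool) :=
  if k.isSome && run.length > 1 then [(run, true)]
  else run.map (fun s => ([s], false))

-- the single pass: accumulate the current run and its key, flush when the key changes
def pvLoopB : List (List (String × String)) → List (List (String × String)) → Option String → List ((List (List (String × String))) × Bool)
  | [], run, k => pvFlush run k
  | s :: rest, run, k =>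
    let ks := pvKeyB s
    if !run.isEmpty && (ks == k) then pvLoopB rest (run ++ [s]) k
    else pvFlush run k ++ pvLoopB rest [s] ks

def identify_parallel_groups_alt (steps : List (List (String × String))) (dependencies : List (String × List (String × List String))) : List ((List (List (String × String))) × Bool) :=
  pvLoopB steps [] none

-- ===== PRECONDITION & SPEC =====
def Spec_identify_parallel_groups (steps : List (List (String × String))) (dependencies : List (String × List (String × List String))) (out : List ((List (List (String × String))) × Bool)) : Prop := out = identify_parallel_groups_alt steps dependencies
instance (steps : List (List (String × String))) (dependencies : List (String × List (String × List String))) (out : List ((List (List (String × String))) × Bool)) : Decidable (Spec_identify_parallel_groups steps dependencies out) := by unfold Spec_identify_parallel_groups; infer_instance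

-- ===== CLAIM (what is proved, stated in full; the proofs are below) =====
def Claim_equal_identify_parallel_groups : Prop := ∀ (steps : List (List (String × String))) (dependencies : List (String × List (String × List String))), Dom_identify_parallel_groups steps dependencies → Spec_identify_parallel_groups steps dependencies (identify_parallel_groups steps dependencies)

-- ===== LEMMAS AND PROOFS =====

-- mid-level grouping function both ports are proved equal to
def pvG : List (List (String × String)) → List ((List (List (String × String))) × Bool)
  | [] => []
  | s :: rest =>
    match pvKeyB s with
    | none => ([s], false) :: pvG rest
    | some k =>
      let run := rest.takeWhile (fun t => pvKeyB t == some k)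
      if run.isEmpty then ([s], false) :: pvG rest
      else (s :: run, true) :: pvG (rest.dropWhile (fun t => pvKeyB t == some k))
termination_by l => l.length
decreasing_by
  · simp
  · have := List.length_dropWhile_le (p := fun t => pvKeyB t == some k) (l := rest)
    simp
    omega

theorem pv_owner_char (a : String) :
    pvOwner.get? a =
      if a ∈ ["kb_ingestion", "api_ingestion", "blog_ingestion"] then some "ingestion"
      else if a ∈ ["introduction_writer", "section_writer", "conclusion_writer"] then some "content_writers"
      else none := by
  by_cases h1 : a = "kb_ingestion" <;> by_cases h2 : a = "api_ingestion" <;>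
    by_cases h3 : a = "blog_ingestion" <;> by_cases h4 : a = "introduction_writer" <;>
    by_cases h5 : a = "section_writer" <;> by_cases h6 : a = "conclusion_writer" <;>
    simp_all [pvOwner, pvPatternsB, PySem.Dict.get?_insert]

theorem pv_keyB_eq (s : List (String × String)) :
    pvKeyB s = (pvAgentType s).bind (fun a => pvOwner.get? a) := by
  simp only [pvKeyB, pvAgentType, pvStepGet]
  cases (s.find? (fun p => p.1 == "agent")) <;> simp [Option.orElse]

theorem pv_mem1 (s : List (String × String)) :
    pvMemOpt (pvAgentType s) ["kb_ingestion", "api_ingestion", "blog_ingestion"] =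
      (pvKeyB s == some "ingestion") := by
  rw [pv_keyB_eq]
  cases h : pvAgentType s with
  | none => simp [pvMemOpt]
  | some a =>
    simp only [pvMemOpt, Option.bind_some, pv_owner_char a]
    by_cases hm : a ∈ ["kb_ingestion", "api_ingestion", "blog_ingestion"]
    · simp [hm]
    · simp only [hm, if_neg, not_false_iff, List.contains_eq_mem]
      simp [hm]

theorem pv_mem2 (s : List (String × String)) :
    pvMemOpt (pvAgentType s) ["introduction_writer", "section_writer", "conclusion_writer"] =
      (pvKeyB s == some "content_writers") := by
  rw [pv_keyB_eq]
  cases h : pvAgentType s with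
  | none => simp [pvMemOpt]
  | some a =>
    simp only [pvMemOpt, Option.bind_some, pv_owner_char a]
    by_cases hm1 : a ∈ ["kb_ingestion", "api_ingestion", "blog_ingestion"]
    · have : a ∉ ["introduction_writer", "section_writer", "conclusion_writer"] := by
        simp only [List.mem_cons, List.not_mem_nil, or_false] at hm1
        rcases hm1 with rfl | rfl | rfl <;> decide
      simp [hm1, this]
    · by_cases hm2 : a ∈ ["introduction_writer", "section_writer", "conclusion_writer"]
      · simp [hm1, hm2]
      · simp [hm1, hm2]

theorem pv_key_cases (s : List (String × String)) (k : String) (h : pvKeyB s = some k) :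
    k = "ingestion" ∨ k = "content_writers" := by
  rw [pv_keyB_eq] at h
  cases ha : pvAgentType s with
  | none => simp [ha] at h
  | some a =>
    rw [ha] at h
    simp only [Option.bind_some, pv_owner_char a] at h
    split_ifs at h <;> simp_all

theorem pvCollect_eq (pa : List String) (l : List (List (String × String))) :
    pvCollect pa l = (l.takeWhile (fun t => pvMemOpt (pvAgentType t) pa),
                      l.dropWhile (fun t => pvMemOpt (pvAgentType t) pa)) := by
  induction l with
  | nil => simp [pvCollect]
  | cons s rest ih =>
    simp only [pvCollect, List.takeWhile, List.dropWhile]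
    by_cases h : pvMemOpt (pvAgentType s) pa <;> simp [h, ih]

-- what A's pattern search returns, in terms of B's key function
theorem pvTry_char (s : List (String × String)) (rest : List (List (String × String))) :
    pvTryPatterns pvPatterns (s :: rest) (pvAgentType s) =
      match pvKeyB s with
      | none => none
      | some k =>
        let tw := rest.takeWhile (fun t => pvKeyB t == some k)
        if tw.isEmpty then none
        else some (s :: tw, rest.dropWhile (fun t => pvKeyB t == some k)) := by
  have e1 : (fun t => pvMemOpt (pvAgentType t) ["kb_ingestion", "api_ingestion", "blog_ingestion"])
      = (fun t => pvKeyB t == some "ingestion") := funext pv_mem1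
  have e2 : (fun t => pvMemOpt (pvAgentType t) ["introduction_writer", "section_writer", "conclusion_writer"])
      = (fun t => pvKeyB t == some "content_writers") := funext pv_mem2
  simp only [pvTryPatterns, pvPatterns, pvCollect_eq, e1, e2, pv_mem1 s, pv_mem2 s]
  cases hk : pvKeyB s with
  | none => simp
  | some k =>
    rcases pv_key_cases s k hk with rfl | rfl
    · simp only [beq_self_eq_true, if_pos]
      simp only [List.takeWhile, List.dropWhile, hk, beq_self_eq_true, if_pos]
      rcases hr : rest.takeWhile (fun t => pvKeyB t == some "ingestion") with _ | ⟨u, us⟩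
      · simp
      · simp
    · have hne : (some "content_writers" == some "ingestion") = false := by decide
      simp only [hk, hne, Bool.false_eq_true, if_neg, beq_self_eq_true, if_pos]
      simp only [List.takeWhile, List.dropWhile, hk, beq_self_eq_true, if_pos]
      rcases hr : rest.takeWhile (fun t => pvKeyB t == some "content_writers") with _ | ⟨u, us⟩
      · simp
      · simp

-- A's loop equals pvG
theorem pvA_eq_G (l : List (List (String × String))) : pvLoopA l = pvG l := by
  induction l using pvLoopA.induct with
  | case1 => simp [pvLoopA, pvG]
  | case2 s rest gr h ih =>
    rw [pvLoopA, h]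
    rw [pvTry_char] at h
    cases hk : pvKeyB s with
    | none => simp [hk] at h
    | some k =>
      rw [hk] at h
      simp only at h
      rcases hr : rest.takeWhile (fun t => pvKeyB t == some k) with _ | ⟨u, us⟩
      · rw [hr] at h; simp at h
      · rw [hr] at h
        simp only [List.isEmpty_cons, Bool.false_eq_true, if_neg] at h
        injection h with h'
        subst h'
        rw [pvG, hk]
        simp only [hr, List.isEmpty_cons, Bool.false_eq_true, if_neg]
        simp [ih]
  | case3 s rest h ih =>
    rw [pvLoopA, h]
    rw [pvTry_char] at h
    rw [pvG]
    cases hk : pvKeyB s with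
    | none => simp [ih]
    | some k =>
      rw [hk] at h
      simp only at h
      rcases hr : rest.takeWhile (fun t => pvKeyB t == some k) with _ | ⟨u, us⟩
      · simp [hr, ih]
      · rw [hr] at h; simp at h

-- flushing a run of None-keyed steps one at a time is pvG on that prefix
theorem pvG_none (l : List (List (String × String))) :
    (l.takeWhile (fun t => pvKeyB t == none)).map (fun s => ([s], false)) ++
      pvG (l.dropWhile (fun t => pvKeyB t == none)) = pvG l := by
  induction l with
  | nil => simp [pvG]
  | cons s rest ih =>
    cases hk : pvKeyB s with
    | none =>
      simp only [List.takeWhile, List.dropWhile, hk]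
      simpa [pvG, hk] using ih
    | some k => simp [List.takeWhile, List.dropWhile, hk, pvG]

-- pvG after a flush: what pvG produces from a list headed by t
theorem pvG_char (t : List (String × String)) (rest : List (List (String × String))) :
    pvG (t :: rest) =
      pvFlush (t :: rest.takeWhile (fun x => pvKeyB x == pvKeyB t)) (pvKeyB t) ++
        pvG (rest.dropWhile (fun x => pvKeyB x == pvKeyB t)) := by
  rw [pvG]
  cases hk : pvKeyB t with
  | none =>
    rw [← pvG_none rest]
    simp [pvFlush]
  | some k =>
    rcases hr : rest.takeWhile (fun x => pvKeyB x == some k) with _ | ⟨u, us⟩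
    · have hd : rest.dropWhile (fun x => pvKeyB x == some k) = rest := by
        cases rest with
        | nil => rfl
        | cons v vs =>
          by_cases hp : (pvKeyB v == some k) = true
          · simp [List.takeWhile_cons, hp] at hr
          · simp [List.dropWhile_cons, hp]
      simp [hr, hd, pvFlush]
    · simp [hr, pvFlush]

-- the run invariant of B's single pass
theorem pvLoopB_run (l : List (List (String × String))) :
    ∀ run k, run ≠ [] →
    pvLoopB l run k =
      pvFlush (run ++ l.takeWhile (fun t => pvKeyB t == k)) k ++
        pvG (l.dropWhile (fun t => pvKeyB t == k)) := by
  induction l with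
  | nil => intro run k hr; simp [pvLoopB, pvG]
  | cons s rest ih =>
    intro run k hr
    rw [pvLoopB]
    by_cases hks : (pvKeyB s == k) = true
    · have hcond : (!run.isEmpty && (pvKeyB s == k)) = true := by
        simp [hks, List.isEmpty_iff, hr]
      rw [if_pos hcond]
      rw [ih (run ++ [s]) k (by simp)]
      simp [List.takeWhile_cons, List.dropWhile_cons, hks]
    · have hcond : (!run.isEmpty && (pvKeyB s == k)) = false := by
        simp [hks]
      rw [hcond]
      simp only [Bool.false_eq_true, if_neg, not_false_iff]
      rw [ih [s] (pvKeyB s) (by simp)]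
      rw [List.singleton_append, ← pvG_char s rest]
      simp [List.takeWhile_cons, List.dropWhile_cons, hks]

theorem pvB_eq_G (l : List (List (String × String))) : pvLoopB l [] none = pvG l := by
  cases l with
  | nil => simp [pvLoopB, pvG, pvFlush]
  | cons s rest =>
    rw [pvG_char s rest, pvLoopB]
    simp only [List.isEmpty_nil, Bool.not_true, Bool.false_and, Bool.false_eq_true, if_neg]
    rw [pvLoopB_run rest [s] (pvKeyB s) (by simp)]
    simp [pvFlush]

-- ===== VERDICT (by name: the statement is the Claim_ definition above) =====
theorem identify_parallel_groups_spec : Claim_equal_identify_parallel_groups := by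
  intro steps dependencies _
  unfold Spec_identify_parallel_groups identify_parallel_groups identify_parallel_groups_alt
  rw [pvA_eq_G, pvB_eq_G]
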